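-- pv_equiv track=rewrite | github.com/ForgeRock/forgeops | lib/python/utils.py | replace_or_append_str
-- ===== SOURCE A (Python) =====
-- def replace_or_append_str(array, search_str, data):
--     """
--     Loop through array looking for search_str, and set the idx to data.
--     """
--
--     found = False
--     for idx, item in enumerate(array):
--         if search_str in item:
--             found = True
--             array[idx] = data
--         elif data in item:
--             found = True
--     if not found:
--         array.append(data)
--
--     return array
-- ===== SOURCE B (Python) =====
-- def replace_or_append_str(array, search_str, data):
--     """Replace matching entries in place, then append data only if no slot now contains it."""
--     for idx, item in enumerate(array):
--         if search_str in item: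
--             array[idx] = data
--     if not any(data in item for item in array):
--         array.append(data)
--     return array
-- ===== Notes on version B (the rewrite author's own statement) =====
-- stated objective: simpler
-- what changed: B drops the threaded 'found' flag: one in-place replacement pass, then a single any() scan for data-containment over the (already replaced) array decides the append, relying on replaced slots now containing data.
import Mathlib
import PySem

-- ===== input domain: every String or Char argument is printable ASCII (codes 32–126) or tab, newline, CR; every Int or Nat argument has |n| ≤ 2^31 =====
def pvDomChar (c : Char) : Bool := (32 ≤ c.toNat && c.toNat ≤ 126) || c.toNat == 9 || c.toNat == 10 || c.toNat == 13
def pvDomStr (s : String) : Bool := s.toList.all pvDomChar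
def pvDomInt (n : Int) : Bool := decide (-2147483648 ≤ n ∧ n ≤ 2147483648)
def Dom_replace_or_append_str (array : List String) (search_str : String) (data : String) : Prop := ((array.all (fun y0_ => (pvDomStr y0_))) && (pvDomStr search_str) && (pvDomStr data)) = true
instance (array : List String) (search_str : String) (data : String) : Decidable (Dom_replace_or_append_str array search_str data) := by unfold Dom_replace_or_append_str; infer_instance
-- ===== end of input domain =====

-- B replaces A's threaded 'found' flag by a replacement pass followed by one any() scan
-- (replaced slots now contain data, so the scan also covers the replaced case): simpler.
-- Both Pythons mutate the passed list in place the same way; the equivalence proved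
-- here is about the returned value.

-- ===== PORT A =====
-- the loop of A: walks the items in order, threading the 'found' flag and rebuilding
-- the (possibly replaced) array; returns (final array, found)
def pvALoop (search_str data : String) : List String → Bool → (List String × Bool)
  | [], found => ([], found)
  | item :: rest, found =>
      if PySem.Str.isIn search_str item then
        let r := pvALoop search_str data rest true
        (data :: r.1, r.2)
      else if PySem.Str.isIn data item then
        let r := pvALoop search_str data rest true
        (item :: r.1, r.2)
      else
        let r := pvALoop search_str data rest found
        (item :: r.1, r.2)

def replace_or_append_str (array : List String) (search_str : String) (data : String) : List String :=
  let r := pvALoop search_str data array false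
  if !r.2 then r.1 ++ [data] else r.1

-- ===== PORT B =====
def replace_or_append_str_alt (array : List String) (search_str : String) (data : String) : List String :=
  let replaced := array.map (fun item => if PySem.Str.isIn search_str item then data else item)
  if !(replaced.any (fun item => PySem.Str.isIn data item)) then replaced ++ [data]
  else replaced

-- ===== PRECONDITION & SPEC =====
def Spec_replace_or_append_str (array : List String) (search_str : String) (data : String) (out : List String) : Prop := out = replace_or_append_str_alt array search_str data
instance (array : List String) (search_str : String) (data : String) (out : List String) : Decidable (Spec_replace_or_append_str array search_str data out) := by unfold Spec_replace_or_append_str; infer_instance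

-- ===== CLAIM (what is proved, stated in full; the proofs are below) =====
def Claim_equal_replace_or_append_str : Prop := ∀ (array : List String) (search_str : String) (data : String), Dom_replace_or_append_str array search_str data → Spec_replace_or_append_str array search_str data (replace_or_append_str array search_str data)

-- ===== LEMMAS AND PROOFS =====

theorem pv_isIn_self (s : List Char) : PySem.Chars.isIn s s = true := by
  rw [PySem.Chars.isIn_iff_infix]

-- A's loop computes B's map, and its flag is 'some original item contains search_str or data'
theorem pvALoop_eq (search_str data : String) (xs : List String) (found : Bool) :
    pvALoop search_str data xs found =
      (xs.map (fun item => if PySem.Str.isIn search_str item then data else item),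
       found || xs.any (fun item => PySem.Str.isIn search_str item || PySem.Str.isIn data item)) := by
  induction xs generalizing found with
  | nil => simp [pvALoop]
  | cons x rest ih =>
    by_cases h1 : PySem.Chars.isIn search_str.toList x.toList = true
    · simp [pvALoop, h1, ih]
    · by_cases h2 : PySem.Chars.isIn data.toList x.toList = true
      · simp [pvALoop, h1, h2, ih]
      · simp [pvALoop, h1, h2, ih]

-- the flag of A equals the any() scan of B over the replaced array
theorem pv_flag_eq (search_str data : String) (xs : List String) :
    xs.any (fun item => PySem.Str.isIn search_str item || PySem.Str.isIn data item) =
      (xs.map (fun item => if PySem.Str.isIn search_str item then data else item)).any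
        (fun item => PySem.Str.isIn data item) := by
  induction xs with
  | nil => rfl
  | cons x rest ih =>
    simp only [PySem.Str.isIn] at ih
    by_cases h1 : PySem.Chars.isIn search_str.toList x.toList = true
    · simp [h1, pv_isIn_self, ih]
    · simp [h1, ih]

-- ===== VERDICT (by name: the statement is the Claim_ definition above) =====
theorem replace_or_append_str_spec : Claim_equal_replace_or_append_str := by
  intro array search_str data _
  show replace_or_append_str array search_str data = replace_or_append_str_alt array search_str data
  simp only [replace_or_append_str, replace_or_append_str_alt, pvALoop_eq, pv_flag_eq,
    Bool.false_or]
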